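-- pv_equiv track=rewrite | github.com/Kinosaur/algorithm-design-term-project | project/naive_change.py | solve_exact_sequence
-- ===== SOURCE A (Python) =====
-- def solve_exact_sequence(exercises):
--     """
--     Solves the weightlifting problem when weight sequences are strictly ordered.
--     'exercises' is a list of lists representing ordered sequences,
--     e.g., [[1, 2, 3], [1, 2, 4, 4], [1, 5]].
--
--     This function implements the Longest Common Prefix (LCP) logic visualized
--     in Scenarios 1, 2, and 3.
--     """
--     if not exercises:
--         return 0
--
--     total_operations = 0
--     E = len(exercises)
--
--     # 1. Start: Push the entire first exercise sequence onto the empty stack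
--     total_operations += len(exercises[0])
--
--     # 2. Process transitions between adjacent exercises
--     for i in range(E - 1):
--         # We compare the current exercise sequence with the next one.
--         seq_current = exercises[i]
--         seq_next = exercises[i + 1]
--
--         # We must find how much of the bottom of the stack can be reused.
--         # This is the length of their Longest Common Prefix (LCP).
--         lcp_len = 0
--         for w1, w2 in zip(seq_current, seq_next):
--             if w1 == w2:
--                 lcp_len += 1
--             else:
--                 break
--
--         # Pops: We must remove everything above the LCP from the current sequence.
--         # If lcp_len is 0, we pop the entire stack.
--         pops = len(seq_current) - lcp_len
--
--         # Pushes: We must add everything needed for the next sequence onto the LCP.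
--         # This builds the unique push sequence.
--         pushes = len(seq_next) - lcp_len
--
--         total_operations += pops + pushes
--
--     # 3. End: Pop the entire last exercise sequence to leave the stack empty
--     total_operations += len(exercises[-1])
--
--     return total_operations
-- ===== SOURCE B (Python) =====
-- def _lcp(a, b):
--     if a and b and a[0] == b[0]:
--         return 1 + _lcp(a[1:], b[1:])
--     return 0
--
--
-- def solve_exact_sequence(exercises):
--     if not exercises:
--         return 0
--     total_len = sum(len(s) for s in exercises)
--     lcp_total = sum(_lcp(a, b) for a, b in zip(exercises, exercises[1:]))
--     # each element is pushed once and popped once, minus one push and one pop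
--     # per element shared on an adjacent common prefix
--     return 2 * total_len - 2 * lcp_total
-- ===== Notes on version B (the rewrite author's own statement) =====
-- stated objective: simpler
-- what changed: Replaces the index loop that accumulates first-length + per-transition pops+pushes + last-length with the closed form 2*sum(len) - 2*sum(adjacent LCP lengths), computed from two aggregates over the list, with the LCP itself as a structural recursion instead of a zip-and-break loop.
import Mathlib
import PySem

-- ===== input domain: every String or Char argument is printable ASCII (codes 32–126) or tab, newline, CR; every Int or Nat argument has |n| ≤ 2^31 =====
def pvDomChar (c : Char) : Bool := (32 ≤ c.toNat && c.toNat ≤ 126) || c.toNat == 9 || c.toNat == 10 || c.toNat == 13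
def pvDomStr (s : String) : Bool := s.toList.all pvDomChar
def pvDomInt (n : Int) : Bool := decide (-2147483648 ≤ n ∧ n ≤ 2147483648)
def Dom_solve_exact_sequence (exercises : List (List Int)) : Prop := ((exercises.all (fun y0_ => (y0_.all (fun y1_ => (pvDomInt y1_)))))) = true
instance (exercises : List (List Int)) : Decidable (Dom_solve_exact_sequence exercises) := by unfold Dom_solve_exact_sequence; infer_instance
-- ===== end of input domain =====

-- B replaces A's running index-loop accumulation with the closed form 2*(total length) - 2*(sum of adjacent-LCP lengths): a simpler two-aggregate decomposition, same cost.


-- ===== PORT A =====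
-- A's inner 'for w1, w2 in zip(seq_current, seq_next): if w1 == w2: lcp_len += 1 else: break'
def lcpLoopA : List (Int × Int) → Int → Int
  | [], acc => acc
  | (w1, w2) :: rest, acc => if w1 = w2 then lcpLoopA rest (acc + 1) else acc

def solve_exact_sequence (exercises : List (List Int)) : Int :=
  if exercises = [] then 0
  else
    let E : Int := exercises.length
    let total_operations : Int := (PySem.List.pyGetD exercises 0 []).length
    let total_operations :=
      (PySem.List.pyRange 0 (E - 1) 1).foldl (fun acc i =>
        let seq_current := PySem.List.pyGetD exercises i []
        let seq_next := PySem.List.pyGetD exercises (i + 1) []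
        let lcp_len := lcpLoopA (seq_current.zip seq_next) 0
        let pops := (seq_current.length : Int) - lcp_len
        let pushes := (seq_next.length : Int) - lcp_len
        acc + (pops + pushes)) total_operations
    total_operations + (PySem.List.pyGetD exercises (-1) []).length

-- ===== PORT B =====
-- Source B's structurally recursive _lcp
def lcpB : List Int → List Int → Int
  | x :: xs, y :: ys => if x = y then 1 + lcpB xs ys else 0
  | _, _ => 0

def solve_exact_sequence_alt (exercises : List (List Int)) : Int :=
  if exercises = [] then 0
  else
    let total_len : Int := (exercises.map (fun s => (s.length : Int))).sum
    let lcp_total : Int := ((exercises.zip exercises.tail).map (fun p => lcpB p.1 p.2)).sum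
    2 * total_len - 2 * lcp_total

-- ===== PRECONDITION & SPEC =====
def Spec_solve_exact_sequence (exercises : List (List Int)) (out : Int) : Prop := out = solve_exact_sequence_alt exercises
instance (exercises : List (List Int)) (out : Int) : Decidable (Spec_solve_exact_sequence exercises out) := by unfold Spec_solve_exact_sequence; infer_instance

-- ===== CLAIM (what is proved, stated in full; the proofs are below) =====
def Claim_equal_solve_exact_sequence : Prop := ∀ (exercises : List (List Int)), Dom_solve_exact_sequence exercises → Spec_solve_exact_sequence exercises (solve_exact_sequence exercises)

-- ===== LEMMAS AND PROOFS =====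

-- A's zip-and-break loop computes B's recursive LCP (shifted by the accumulator)
lemma lcpLoopA_eq_lcpB (a : List Int) : ∀ (b : List Int) (acc : Int),
    lcpLoopA (a.zip b) acc = acc + lcpB a b := by
  induction a with
  | nil => intro b acc; simp [lcpLoopA, lcpB]
  | cons x xs ih =>
    intro b acc
    cases b with
    | nil => simp [lcpLoopA, lcpB]
    | cons y ys =>
      by_cases h : x = y
      · simp [lcpLoopA, lcpB, h, ih]; ring
      · simp [lcpLoopA, lcpB, h]

-- A's index fold over range(E-1) is a sum over adjacent pairs
lemma foldl_adjacent (l : List (List Int)) (g : List Int → List Int → Int) (acc : Int) :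
    (PySem.List.pyRange 0 ((l.length : Int) - 1) 1).foldl
      (fun a i => a + g (PySem.List.pyGetD l i []) (PySem.List.pyGetD l (i + 1) [])) acc
    = acc + ((l.zip l.tail).map (fun p => g p.1 p.2)).sum := by
  rw [PySem.List.foldl_add]
  have hmap : (PySem.List.pyRange 0 ((l.length : Int) - 1) 1).map
      (fun i => g (PySem.List.pyGetD l i []) (PySem.List.pyGetD l (i + 1) []))
      = (l.zip l.tail).map (fun p => g p.1 p.2) := by
    rw [PySem.List.pyRange_one, List.map_map]
    apply List.ext_getElem
    · simp [List.length_zip]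
    · intro k h1 h2
      simp only [List.getElem_map, List.getElem_range, Function.comp_apply]
      have hk : k < l.length - 1 := by simp at h1; omega
      have e1 : (0 : Int) + (k : Int) = ((k : Nat) : Int) := by omega
      rw [e1, PySem.List.pyGetD_natCast]
      have e2 : ((k : Nat) : Int) + 1 = (((k + 1 : Nat)) : Int) := by push_cast; ring
      rw [e2, PySem.List.pyGetD_natCast]
      rw [List.getElem_zip]
      have hkl : k < l.length := by omega
      have hk1 : k + 1 < l.length := by omega
      rw [List.getD_eq_getElem _ _ hkl, List.getD_eq_getElem _ _ hk1]
      congr 1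
      rw [List.getElem_tail]
  rw [hmap]

-- exercises[-1] on a nonempty list is its last element
lemma pyGetD_neg_one (l : List (List Int)) (h : l ≠ []) :
    PySem.List.pyGetD l (-1) [] = l.getLast h := by
  have hl : 0 < l.length := List.length_pos_iff.mpr h
  simp only [PySem.List.pyGetD, PySem.List.pyGet?, PySem.List.pyIdx?]
  rw [if_neg (by omega), if_pos (by omega)]
  have e : ((-(-1:Int))).toNat = 1 := rfl
  rw [e]
  show (l[l.length - 1]?).getD [] = l.getLast h
  rw [List.getElem?_eq_getElem (by omega : l.length - 1 < l.length)]
  simp [List.getLast_eq_getElem]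

-- telescoping: twice the total length = first + Σ adjacent (len + len) + last
lemma two_sum_len (x : List Int) (t : List (List Int)) :
    2 * (((x :: t).map (fun s => (s.length : Int))).sum)
    = (x.length : Int)
      + (((x :: t).zip t).map (fun p => ((p.1.length : Int) + (p.2.length : Int)))).sum
      + (((x :: t).getLast (by simp)).length : Int) := by
  induction t generalizing x with
  | nil => simp; ring
  | cons y ys ih =>
    have h := ih y
    rw [List.getLast_cons (by simp : y :: ys ≠ [])]
    simp only [List.map_cons, List.sum_cons, List.zip_cons_cons] at *
    omega

-- split the per-pair (pops + pushes) sum into its length and LCP parts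
lemma sum_pair_sub (ps : List (List Int × List Int)) :
    (ps.map (fun p => ((p.1.length : Int) - lcpB p.1 p.2) + ((p.2.length : Int) - lcpB p.1 p.2))).sum
    = (ps.map (fun p => ((p.1.length : Int) + (p.2.length : Int)))).sum
      - 2 * (ps.map (fun p => lcpB p.1 p.2)).sum := by
  induction ps with
  | nil => simp
  | cons p ps ih => simp [ih]; ring

-- ===== VERDICT (by name: the statement is the Claim_ definition above) =====
theorem solve_exact_sequence_spec : Claim_equal_solve_exact_sequence := by
  intro exercises _
  unfold Spec_solve_exact_sequence
  cases exercises with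
  | nil => rfl
  | cons x t =>
    rw [solve_exact_sequence, solve_exact_sequence_alt]
    rw [if_neg (by simp), if_neg (by simp)]
    simp only []
    rw [foldl_adjacent (x :: t)
      (fun a b => ((a.length : Int) - lcpLoopA (a.zip b) 0) + ((b.length : Int) - lcpLoopA (a.zip b) 0))]
    rw [pyGetD_neg_one (x :: t) (by simp)]
    have h0 : PySem.List.pyGetD (x :: t) 0 [] = x := by
      rw [show (0 : Int) = ((0 : Nat) : Int) by rfl, PySem.List.pyGetD_natCast]; rfl
    rw [h0]
    have hL : ∀ p : List Int × List Int, lcpLoopA (p.1.zip p.2) 0 = lcpB p.1 p.2 := by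
      intro p; rw [lcpLoopA_eq_lcpB]; ring
    simp only [hL]
    rw [show (x :: t).tail = t from rfl]
    rw [sum_pair_sub ((x :: t).zip t)]
    rw [two_sum_len x t]
    ring
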